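-- pv_equiv track=rewrite | github.com/ericbauer55/projecteuler50 | src/pe50/solver.py | get_partial_sums
-- ===== SOURCE A (Python) =====
-- def get_partial_sums(a_max, A):
--     """
--     This function creates all partial sums from elements 1 to k of sequence @A.
--     The generation stops once the kth sum exceeds @a_max
--
--     Inputs:
--     @a_max = this is the largest value in the sequence A that is allowed.
--     @A = list of elements in the sequence of interest
--
--     Output:
--     @sums_dict = dictionary where the keys are index k and values are the partial sum s_k = sum(a1...ak) <= @a_max
--     """
--     # initialize the partial sums list
--     k=1
--     partial_sums = [A[0]]
--     # initialize the next partial sum as the initial condition to enter the while loop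
--     s_k = partial_sums[k-1]
--
--     # As long as the next partial sum is less than @a_max, append it to the list and k++
--     while (s_k <= a_max) and (k < len(A)):
--         s_k = partial_sums[k-1] + A[k]
--         if s_k <= a_max:
--             partial_sums.append(s_k)
--         k += 1
--
--     sums_dict = {i+1:sum for i, sum in enumerate(partial_sums)}
--     return sums_dict
-- ===== SOURCE B (Python) =====
-- def get_partial_sums(a_max, A):
--     # two-phase: build the full prefix-sum table, then truncate it
--     sums = []
--     total = 0
--     for a in A:
--         total += a
--         sums.append(total)
--     kept = [sums[0]]
--     if sums[0] <= a_max: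
--         for s in sums[1:]:
--             if s > a_max:
--                 break
--             kept.append(s)
--     return {i + 1: s for i, s in enumerate(kept)}
-- ===== Notes on version B (the rewrite author's own statement) =====
-- stated objective: simpler
-- what changed: Replaces A's single fused while-loop (index k, re-reading partial_sums[k-1], conditional append) with two plain passes: build the full prefix-sum table, then truncate it at the first sum exceeding a_max (the first sum always kept, as in A).
import Mathlib
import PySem

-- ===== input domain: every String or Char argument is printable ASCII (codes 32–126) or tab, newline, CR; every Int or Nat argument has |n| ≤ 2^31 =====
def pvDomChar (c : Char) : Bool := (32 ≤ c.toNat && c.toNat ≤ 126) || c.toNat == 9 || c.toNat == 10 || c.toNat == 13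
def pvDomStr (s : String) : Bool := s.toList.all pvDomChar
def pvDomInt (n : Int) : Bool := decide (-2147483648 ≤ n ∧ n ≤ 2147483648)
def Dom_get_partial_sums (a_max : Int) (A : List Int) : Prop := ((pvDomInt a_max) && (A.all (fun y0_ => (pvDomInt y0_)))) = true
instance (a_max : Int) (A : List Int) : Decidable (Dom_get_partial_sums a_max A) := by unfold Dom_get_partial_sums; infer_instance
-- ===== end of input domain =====

-- B builds the full prefix-sum table and then truncates it, instead of A's fused accumulate-and-append while loop; objective: simpler.


-- ===== PORT A =====
-- the while loop: state (k, partial_sums, s_k); fuel bounds the iteration count (k increases each pass, loop guard has k < len A)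
def pvALoop (a_max : Int) (A : List Int) : Nat → Nat → List Int → Int → List Int
  | 0, _, ps, _ => ps
  | fuel + 1, k, ps, s_k =>
    if s_k ≤ a_max ∧ k < A.length then
      -- s_k = partial_sums[k-1] + A[k]; both indices are in range on every reachable state
      let s' := ((PySem.List.pyGet? ps (Int.ofNat (k - 1))).getD 0) +
                ((PySem.List.pyGet? A (Int.ofNat k)).getD 0)
      let ps' := if s' ≤ a_max then ps ++ [s'] else ps
      pvALoop a_max A fuel (k + 1) ps' s'
    else ps

def get_partial_sums (a_max : Int) (A : List Int) : List (Int × Int) :=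
  match A with
  | [] => []  -- unreachable: A[0] raises IndexError, excluded by Pre_
  | a0 :: _ =>
    let ps := pvALoop a_max A A.length 1 [a0] a0
    PySem.List.enumerate ps |>.map (fun p => (p.1 + 1, p.2))

-- ===== PORT B =====
-- first pass: the full prefix-sum table
def pvSums : List Int → Int → List Int
  | [], _ => []
  | a :: rest, total => (total + a) :: pvSums rest (total + a)

-- second pass: the truncation loop (break at the first sum exceeding a_max)
def pvTrunc (a_max : Int) : List Int → List Int
  | [] => []
  | s :: rest => if s > a_max then [] else s :: pvTrunc a_max rest

def get_partial_sums_alt (a_max : Int) (A : List Int) : List (Int × Int) :=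
  match pvSums A 0 with
  | [] => []  -- unreachable: sums[0] raises IndexError, excluded by Pre_
  | s0 :: rest =>
    let kept := s0 :: (if s0 ≤ a_max then pvTrunc a_max rest else [])
    PySem.List.enumerate kept |>.map (fun p => (p.1 + 1, p.2))

-- ===== PRECONDITION & SPEC =====
-- Pre_ excludes only the empty list, on which both A and B raise IndexError (A[0] / sums[0]).
def Pre_get_partial_sums (a_max : Int) (A : List Int) : Prop := A ≠ []
instance (a_max : Int) (A : List Int) : Decidable (Pre_get_partial_sums a_max A) := by unfold Pre_get_partial_sums; infer_instance
def pvWitness_get_partial_sums : Int × List Int := (10, [1, 2, 3, 5])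

def Spec_get_partial_sums (a_max : Int) (A : List Int) (out : List (Int × Int)) : Prop := out = get_partial_sums_alt a_max A
instance (a_max : Int) (A : List Int) (out : List (Int × Int)) : Decidable (Spec_get_partial_sums a_max A out) := by unfold Spec_get_partial_sums; infer_instance

-- ===== CLAIM (what is proved, stated in full; the proofs are below) =====
def Claim_equal_get_partial_sums : Prop := ∀ (a_max : Int) (A : List Int), Dom_get_partial_sums a_max A → Pre_get_partial_sums a_max A → Spec_get_partial_sums a_max A (get_partial_sums a_max A)

-- ===== LEMMAS AND PROOFS =====

-- once s_k exceeds a_max the loop returns partial_sums unchanged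
theorem pvALoop_exit (a_max : Int) (A : List Int) (fuel k : Nat) (ps : List Int) (s : Int)
    (h : a_max < s) : pvALoop a_max A fuel k ps s = ps := by
  cases fuel with
  | zero => rfl
  | succ fuel => simp [pvALoop]; omega

-- the loop invariant: at entry k = |partial_sums|, partial_sums[k-1] = s_k ≤ a_max,
-- and the loop appends exactly the truncated prefix sums of the rest of A
theorem pvALoop_inv (a_max : Int) (A : List Int) (fuel : Nat) :
    ∀ (k : Nat) (ps : List Int) (s : Int), k = ps.length → ps ≠ [] →
    A.length - k ≤ fuel → s ≤ a_max →
    PySem.List.pyGet? ps (Int.ofNat (k - 1)) = some s →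
    pvALoop a_max A fuel k ps s = ps ++ pvTrunc a_max (pvSums (A.drop k) s) := by
  induction fuel with
  | zero =>
    intro k ps s hk hne hfuel hs hlast
    have : A.length ≤ k := by omega
    simp [pvALoop, List.drop_eq_nil_of_le this, pvSums, pvTrunc]
  | succ fuel ih =>
    intro k ps s hk hne hfuel hs hlast
    rw [pvALoop]
    by_cases hkA : k < A.length
    · have hdrop : A.drop k = A[k] :: A.drop (k + 1) := List.drop_eq_getElem_cons hkA
      have hA : PySem.List.pyGet? A (Int.ofNat k) = some A[k] := by
        rw [Int.ofNat_eq_natCast, PySem.List.pyGet?_natCast]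
        simp [hkA]
      simp only [hs, hkA, and_self, if_true, hlast, hA, Option.getD_some]
      rw [hdrop, pvSums, pvTrunc]
      by_cases hcmp : s + A[k] ≤ a_max
      · rw [if_pos hcmp, if_neg (by omega)]
        have hget : PySem.List.pyGet? (ps ++ [s + A[k]]) (Int.ofNat ((k + 1) - 1)) = some (s + A[k]) := by
          simpa [hk] using PySem.List.pyGet?_append_length (pre := ps) (y := s + A[k]) (ys := ([] : List Int))
        rw [ih (k + 1) (ps ++ [s + A[k]]) (s + A[k]) (by simp [hk]) (by simp) (by omega) hcmp hget]
        simp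
      · rw [if_neg hcmp, if_pos (by omega)]
        rw [pvALoop_exit a_max A fuel (k + 1) ps (s + A[k]) (by omega)]
        simp
    · have hlen : A.length ≤ k := by omega
      rw [if_neg (by simp [hkA])]
      simp [List.drop_eq_nil_of_le hlen, pvSums, pvTrunc]

-- ===== VERDICT (by name: the statement is the Claim_ definition above) =====
theorem get_partial_sums_spec : Claim_equal_get_partial_sums := by
  intro a_max A _ hpre
  unfold Spec_get_partial_sums
  match A with
  | [] => exact absurd rfl hpre
  | a0 :: rest =>
    have hsums : pvSums (a0 :: rest) 0 = a0 :: pvSums rest a0 := by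
      simp [pvSums]
    have hB : get_partial_sums_alt a_max (a0 :: rest)
        = ((PySem.List.enumerate (a0 :: (if a0 ≤ a_max then pvTrunc a_max (pvSums rest a0) else []))).map (fun p => (p.1 + 1, p.2))) := by
      unfold get_partial_sums_alt
      rw [hsums]
    have key : pvALoop a_max (a0 :: rest) (a0 :: rest).length 1 [a0] a0
        = a0 :: (if a0 ≤ a_max then pvTrunc a_max (pvSums rest a0) else []) := by
      by_cases h0 : a0 ≤ a_max
      · have hget : PySem.List.pyGet? [a0] (Int.ofNat (1 - 1)) = some a0 := by
          simp [PySem.List.pyGet?, PySem.List.pyIdx?]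
        rw [pvALoop_inv a_max (a0 :: rest) (a0 :: rest).length 1 [a0] a0 rfl (by simp)
          (by simp) h0 hget]
        simp [h0]
      · rw [pvALoop_exit a_max (a0 :: rest) (a0 :: rest).length 1 [a0] a0 (by omega)]
        simp [h0]
    show ((PySem.List.enumerate (pvALoop a_max (a0 :: rest) (a0 :: rest).length 1 [a0] a0)).map (fun p => (p.1 + 1, p.2))) = _
    rw [key, hB]
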